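-- pv_equiv track=rewrite | github.com/TuankedeBeun/TkPixels | TkPixels/LedGraph.py | get_graph_section_ids_of_all_leds
-- ===== SOURCE A (Python) =====
-- def get_graph_section_ids_of_all_leds(led_nrs_per_intersection, total_leds):
--
--     graph_section_ids_strip = list()
--     led_nrs_per_intersection.pop(0)
--
--     section_id = 0
--     for i in range(total_leds):
--         while section_id < len(led_nrs_per_intersection) and i >= led_nrs_per_intersection[section_id]:
--             section_id += 1
--         if section_id >= len(led_nrs_per_intersection):
--             raise ValueError('LED nr out of bounds')
--         graph_section_ids_strip.append(section_id)
--
--     return graph_section_ids_strip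
-- ===== SOURCE B (Python) =====
-- def get_graph_section_ids_of_all_leds(led_nrs_per_intersection, total_leds):
--     led_nrs_per_intersection.pop(0)
--     result = []
--     for section_id, boundary in enumerate(led_nrs_per_intersection):
--         count = min(boundary, total_leds) - len(result)
--         if count > 0:
--             result.extend([section_id] * count)
--         if len(result) >= total_leds:
--             break
--     if len(result) < total_leds:
--         raise ValueError('LED nr out of bounds')
--     return result
-- ===== Notes on version B (the rewrite author's own statement) =====
-- stated objective: simpler
-- what changed: Inverts the loop nesting: instead of A's per-LED loop with an inner while that advances a section pointer, B loops once over the sections and bulk-fills each section's whole block of ids with a clamped extend, breaking when the strip is full.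
import Mathlib
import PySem

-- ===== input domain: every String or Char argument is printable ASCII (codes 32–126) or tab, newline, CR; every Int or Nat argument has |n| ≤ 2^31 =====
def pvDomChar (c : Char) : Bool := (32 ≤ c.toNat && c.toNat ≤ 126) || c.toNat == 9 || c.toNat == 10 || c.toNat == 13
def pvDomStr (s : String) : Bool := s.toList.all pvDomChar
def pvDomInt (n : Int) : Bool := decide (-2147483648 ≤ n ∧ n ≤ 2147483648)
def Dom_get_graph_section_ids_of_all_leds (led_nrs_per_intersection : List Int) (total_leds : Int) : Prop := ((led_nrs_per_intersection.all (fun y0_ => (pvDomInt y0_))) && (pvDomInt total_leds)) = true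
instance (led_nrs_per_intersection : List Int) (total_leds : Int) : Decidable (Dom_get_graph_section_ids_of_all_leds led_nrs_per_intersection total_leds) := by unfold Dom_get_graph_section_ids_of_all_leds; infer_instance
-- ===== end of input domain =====

-- B replaces A's per-LED pointer advance by an outer loop over the sections that bulk-fills
-- each section's block of ids (objective: simpler). Equivalence is about the RETURN value;
-- both A and B also mutate the argument by popping its first element.

-- ===== PORT A =====
-- the inner 'while section_id < len(...) and i >= ...[section_id]: section_id += 1'
def pvAdvance (bs : List Int) (i : Int) (sid : Nat) : Nat :=
  if h : sid < bs.length then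
    if bs[sid] ≤ i then pvAdvance bs i (sid + 1) else sid
  else sid
termination_by bs.length - sid

-- the 'for i in range(total_leds)' loop; on the ValueError path it stops and returns acc
def pvLoopA (bs : List Int) (total i : Int) (sid : Nat) (acc : List Int) : List Int :=
  if h : i < total then
    let s := pvAdvance bs i sid
    if bs.length ≤ s then acc  -- Python raises ValueError here (excluded by Pre_)
    else pvLoopA bs total (i + 1) s (acc ++ [(s : Int)])
  else acc
termination_by (total - i).toNat
decreasing_by simp at *; omega

def get_graph_section_ids_of_all_leds (led_nrs_per_intersection : List Int) (total_leds : Int) : List Int :=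
  pvLoopA led_nrs_per_intersection.tail total_leds 0 0 []

-- ===== PORT B =====
-- 'for section_id, boundary in enumerate(...)' with bulk extend and break
def pvFillB (total : Int) : List (Int × Int) → List Int → List Int
  | [], res => res
  | (s, bd) :: rest, res =>
    let count : Int := min bd total - res.length
    let res' := if 0 < count then res ++ List.replicate count.toNat s else res
    if total ≤ (res'.length : Int) then res' else pvFillB total rest res'

def get_graph_section_ids_of_all_leds_alt (led_nrs_per_intersection : List Int) (total_leds : Int) : List Int :=
  pvFillB total_leds (PySem.List.enumerate led_nrs_per_intersection.tail 0) []
  -- Python raises ValueError afterwards iff the result is shorter than total_leds (excluded by Pre_)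

-- ===== PRECONDITION & SPEC =====
-- Pre_ excludes exactly the inputs where A raises: the empty list (pop(0) → IndexError) and
-- total_leds > 0 with no boundary in the tail reaching total_leds (→ ValueError).
def Pre_get_graph_section_ids_of_all_leds (led_nrs_per_intersection : List Int) (total_leds : Int) : Prop :=
  led_nrs_per_intersection ≠ [] ∧
    (total_leds ≤ 0 ∨ led_nrs_per_intersection.tail.any (fun x => decide (total_leds ≤ x)) = true)
instance (led_nrs_per_intersection : List Int) (total_leds : Int) : Decidable (Pre_get_graph_section_ids_of_all_leds led_nrs_per_intersection total_leds) := by unfold Pre_get_graph_section_ids_of_all_leds; infer_instance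

def pvWitness_get_graph_section_ids_of_all_leds : List Int × Int := ([0, 3, 5], 5)

def Spec_get_graph_section_ids_of_all_leds (led_nrs_per_intersection : List Int) (total_leds : Int) (out : List Int) : Prop := out = get_graph_section_ids_of_all_leds_alt led_nrs_per_intersection total_leds
instance (led_nrs_per_intersection : List Int) (total_leds : Int) (out : List Int) : Decidable (Spec_get_graph_section_ids_of_all_leds led_nrs_per_intersection total_leds out) := by unfold Spec_get_graph_section_ids_of_all_leds; infer_instance

-- ===== CLAIM (what is proved, stated in full; the proofs are below) =====
def Claim_equal_get_graph_section_ids_of_all_leds : Prop := ∀ (led_nrs_per_intersection : List Int) (total_leds : Int), Dom_get_graph_section_ids_of_all_leds led_nrs_per_intersection total_leds → Pre_get_graph_section_ids_of_all_leds led_nrs_per_intersection total_leds → Spec_get_graph_section_ids_of_all_leds led_nrs_per_intersection total_leds (get_graph_section_ids_of_all_leds led_nrs_per_intersection total_leds)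

-- ===== LEMMAS AND PROOFS =====

-- Both sides are proved equal to this reference: LED i gets the first section whose
-- boundary exceeds i.
def pvRef (bs : List Int) (total i : Int) : Int :=
  (bs.findIdx (fun x => decide (i < x)) : Int)

theorem pvAdvance_eq (bs : List Int) (i : Int) (sid : Nat)
    (hle : sid ≤ bs.length)
    (hlt : ∀ t, t < sid → ∀ h2 : t < bs.length, bs[t] ≤ i) :
    pvAdvance bs i sid = bs.findIdx (fun x => decide (i < x)) := by
  unfold pvAdvance
  by_cases h : sid < bs.length
  · simp only [h, dif_pos]
    by_cases hx : bs[sid] ≤ i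
    · rw [if_pos hx]
      exact pvAdvance_eq bs i (sid + 1) h (by
        intro t ht h2
        rcases Nat.lt_succ_iff_lt_or_eq.mp ht with h' | h'
        · exact hlt t h' h2
        · subst h'; exact hx)
    · rw [if_neg hx]
      symm
      rw [List.findIdx_eq h]
      refine ⟨by simp; omega, ?_⟩
      intro j hj
      simp only [decide_eq_false_iff_not, not_lt]
      exact hlt j hj (lt_trans hj h)
  · simp only [h, dif_neg, not_false_iff]
    have hs : sid = bs.length := le_antisymm hle (le_of_not_gt h)
    symm
    rw [hs, List.findIdx_eq_length]
    intro x hx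
    obtain ⟨t, h2, rfl⟩ := List.mem_iff_getElem.mp hx
    simp only [decide_eq_false_iff_not, not_lt]
    exact hlt t (hs ▸ h2) h2
termination_by bs.length - sid

theorem pvLoopA_eq (bs : List Int) (total : Int) :
    ∀ (i : Int) (sid : Nat) (acc : List Int), 0 ≤ i → sid ≤ bs.length →
    (∀ t, t < sid → ∀ h2 : t < bs.length, bs[t] ≤ i) →
    (∀ j : Int, i ≤ j → j < total → ∃ x ∈ bs, j < x) →
    pvLoopA bs total i sid acc =
      acc ++ (List.range (total - i).toNat).map (fun k : Nat => pvRef bs total (i + (k : Int))) := by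
  intro i sid acc hi hle hlt hcov
  unfold pvLoopA
  by_cases h : i < total
  · simp only [h, dif_pos]
    have hadv : pvAdvance bs i sid = bs.findIdx (fun x => decide (i < x)) :=
      pvAdvance_eq bs i sid hle hlt
    have hfound : bs.findIdx (fun x => decide (i < x)) < bs.length := by
      apply List.findIdx_lt_length_of_exists
      obtain ⟨x, hx, hxi⟩ := hcov i le_rfl h
      exact ⟨x, hx, by simpa using hxi⟩
    rw [hadv, if_neg (by omega)]
    rw [pvLoopA_eq bs total (i + 1) _ (acc ++ [((bs.findIdx (fun x => decide (i < x)) : Nat) : Int)]) (by omega) (le_of_lt hfound) ?hlt' ?hcov']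
    case hlt' =>
      intro t ht h2
      have := List.not_of_lt_findIdx ht
      simp only [decide_eq_false_iff_not, not_lt] at this
      omega
    case hcov' => exact fun j hj hjt => hcov j (by omega) hjt
    have hm : (total - i).toNat = ((total - (i + 1)).toNat) + 1 := by omega
    have htail : ((fun k : Nat => pvRef bs total (i + (k : Int))) ∘ Nat.succ)
        = (fun k : Nat => pvRef bs total (i + 1 + (k : Int))) := by
      funext a
      have h2 : i + (((a + 1 : Nat)) : Int) = i + 1 + (a : Int) := by push_cast; ring
      simp only [Function.comp_apply, Nat.succ_eq_add_one, h2]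
    rw [hm, List.range_succ_eq_map, List.map_cons, List.map_map, htail]
    simp [pvRef]
  · simp only [h, dif_neg, not_false_iff]
    have : (total - i).toNat = 0 := by omega
    simp [this]
termination_by i sid acc h1 h2 h3 h4 => (total - i).toNat
decreasing_by omega

theorem pvFillB_eq (bs : List Int) (total : Int) :
    ∀ (l : List Int) (k : Nat) (res : List Int), bs.drop k = l →
    (∀ t, t < k → ∀ h2 : t < bs.length, bs[t] ≤ (res.length : Int)) →
    (res.length : Int) < total →
    (∀ j : Int, 0 ≤ j → j < total → ∃ x ∈ bs, j < x) →
    pvFillB total (PySem.List.enumerate l (k : Int)) res =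
      res ++ (List.range (total - res.length).toNat).map
        (fun m : Nat => pvRef bs total ((res.length : Int) + (m : Int))) := by
  intro l k res hdrop hlt hres hcov
  match l with
  | [] =>
    exfalso
    have hk : bs.length ≤ k := by
      by_contra hk
      push_neg at hk
      have := List.drop_eq_nil_iff.mp hdrop
      omega
    obtain ⟨x, hx, hxi⟩ := hcov res.length (by positivity) hres
    obtain ⟨t, h2, rfl⟩ := List.mem_iff_getElem.mp hx
    have := hlt t (lt_of_lt_of_le h2 hk) h2
    omega
  | bd :: rest =>
    have hklen : k < bs.length := by
      by_contra hk
      push_neg at hk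
      rw [List.drop_eq_nil_of_le hk] at hdrop
      simp at hdrop
    have hbd : bs[k] = bd := by
      have h0 : (bs.drop k)[0]'(by rw [hdrop]; simp) = bd := by simp [hdrop]
      rw [List.getElem_drop] at h0
      simpa using h0
    have hrest : bs.drop (k + 1) = rest := by
      rw [← List.tail_drop, hdrop, List.tail_cons]
    rw [PySem.List.enumerate_cons]
    unfold pvFillB
    simp only []
    set count : Int := min bd total - res.length with hcount
    by_cases hc : 0 < count
    · rw [if_pos hc]
      set res' := res ++ List.replicate count.toNat ((k : Int)) with hres'
      have hlen' : (res'.length : Int) = min bd total := by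
        simp [hres']; omega
      -- the fresh block matches the reference values
      have hblock : List.replicate count.toNat ((k : Int)) =
          (List.range count.toNat).map (fun m : Nat => pvRef bs total ((res.length : Int) + (m : Int))) := by
        apply List.ext_getElem (by simp)
        intro n h1 h2
        simp only [List.getElem_replicate, List.getElem_map, List.getElem_range]
        symm
        unfold pvRef
        have hn : (n : Int) < count := by
          have := h1; simp at this; omega
        norm_cast
        rw [List.findIdx_eq hklen]
        constructor
        · simp only [decide_eq_true_eq, hbd]
          omega
        · intro j hj
          simp only [decide_eq_false_iff_not, not_lt]
          have := hlt j hj (lt_trans hj hklen)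
          omega
      by_cases hb : total ≤ (res'.length : Int)
      · rw [if_pos hb]
        have htt : min bd total = total := by omega
        have hcnt : count.toNat = (total - res.length).toNat := by omega
        rw [hres', hblock, hcnt]
      · rw [if_neg hb]
        have : ((k : Nat) + 1 : Int) = ((k + 1 : Nat) : Int) := by push_cast; ring
        rw [this, pvFillB_eq bs total rest (k + 1) res' hrest ?hlt' (by omega) hcov]
        case hlt' =>
          intro t ht h2
          rcases Nat.lt_succ_iff_lt_or_eq.mp ht with h' | h'
          · have := hlt t h' h2
            have : (res.length : Int) ≤ res'.length := by simp [hres']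
            omega
          · subst h'
            rw [hbd]
            omega
        have hlen2 : res'.length = res.length + count.toNat := by rw [hres']; simp
        have hsplit : (total - res.length).toNat = count.toNat + (total - res'.length).toNat := by
          omega
        conv_rhs => rw [hsplit, List.range_add, List.map_append, List.map_map, ← hblock]
        rw [← List.append_assoc, ← hres']
        congr 1
        apply List.map_congr_left
        intro a _
        simp only [Function.comp_apply]
        have h2 : (res'.length : Int) + (a : Int)
            = (res.length : Int) + ((count.toNat + a : Nat) : Int) := by
          push_cast [hlen2]
          omega
        rw [← h2]
    · rw [if_neg hc, if_neg (by omega)]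
      have hbdle : bd ≤ (res.length : Int) := by omega
      have : ((k : Nat) + 1 : Int) = ((k + 1 : Nat) : Int) := by push_cast; ring
      rw [this, pvFillB_eq bs total rest (k + 1) res hrest ?hlt2 hres hcov]
      case hlt2 =>
        intro t ht h2
        rcases Nat.lt_succ_iff_lt_or_eq.mp ht with h' | h'
        · exact hlt t h' h2
        · subst h'; rw [hbd]; exact hbdle

theorem pvFillB_nonpos (total : Int) (l : List (Int × Int)) (htot : total ≤ 0) :
    pvFillB total l [] = [] := by
  match l with
  | [] => rfl
  | (s, bd) :: rest =>
    simp only [pvFillB]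
    split_ifs with h1 h2 h3
    · exact absurd h1 (by simp; omega)
    · exact absurd h1 (by simp; omega)
    · rfl
    · exfalso
      simp at h3
      omega

-- ===== VERDICT (by name: the statement is the Claim_ definition above) =====
theorem get_graph_section_ids_of_all_leds_spec : Claim_equal_get_graph_section_ids_of_all_leds := by
  intro led total _hdom hpre
  obtain ⟨hne, hcase⟩ := hpre
  unfold Spec_get_graph_section_ids_of_all_leds
  unfold get_graph_section_ids_of_all_leds get_graph_section_ids_of_all_leds_alt
  set bs := led.tail with hbs
  by_cases htot : total ≤ 0
  · rw [pvFillB_nonpos total _ htot]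
    unfold pvLoopA
    rw [dif_neg (by omega)]
  · push_neg at htot
    have hcov : ∀ j : Int, 0 ≤ j → j < total → ∃ x ∈ bs, j < x := by
      rcases hcase with h | h
      · omega
      · simp only [List.any_eq_true, decide_eq_true_eq] at h
        obtain ⟨x, hx, hxt⟩ := h
        exact fun j _ hj => ⟨x, hx, by omega⟩
    rw [pvLoopA_eq bs total 0 0 [] le_rfl (Nat.zero_le _)
      (fun t ht _ => absurd ht (Nat.not_lt_zero t)) hcov]
    have hB := pvFillB_eq bs total bs 0 []
      (by simp) (fun t ht _ => absurd ht (Nat.not_lt_zero t)) (by simpa using htot) hcov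
    simp only [Nat.cast_zero, List.length_nil, List.nil_append, sub_zero] at hB
    rw [hB]
    simp
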